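-- pv_equiv track=rewrite | github.com/gASK13/AOC | 2024/12/12.py | simple_price
-- ===== SOURCE A (Python) =====
-- def simple_price(plot):
--     area = len(plot)
--     circ = 0
--     for x, y in plot:
--         for dx, dy in [(0, -1), (1, 0), (0, 1), (-1, 0)]:
--             if (x + dx, y + dy) not in plot:
--                 circ += 1
--     return circ * area
-- ===== SOURCE B (Python) =====
-- def simple_price(plot):
--     area = len(plot)
--     mult = {}
--     for c in plot:
--         mult[c] = mult.get(c, 0) + 1
--     adj = 0
--     for (x, y), m in mult.items():
--         for d in ((x + 1, y), (x, y + 1)):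
--             md = mult.get(d, 0)
--             if md:
--                 adj += m + md
--     return (4 * area - adj) * area
-- ===== Notes on version B (the rewrite author's own statement) =====
-- stated objective: faster
-- what changed: B builds a multiplicity counter once and counts only forward (right/down) shared edges over the distinct cells, computing perimeter as 4*area minus weighted shared sides, instead of A's membership scan of the whole list for all 4 neighbors of every occurrence.
import Mathlib
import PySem

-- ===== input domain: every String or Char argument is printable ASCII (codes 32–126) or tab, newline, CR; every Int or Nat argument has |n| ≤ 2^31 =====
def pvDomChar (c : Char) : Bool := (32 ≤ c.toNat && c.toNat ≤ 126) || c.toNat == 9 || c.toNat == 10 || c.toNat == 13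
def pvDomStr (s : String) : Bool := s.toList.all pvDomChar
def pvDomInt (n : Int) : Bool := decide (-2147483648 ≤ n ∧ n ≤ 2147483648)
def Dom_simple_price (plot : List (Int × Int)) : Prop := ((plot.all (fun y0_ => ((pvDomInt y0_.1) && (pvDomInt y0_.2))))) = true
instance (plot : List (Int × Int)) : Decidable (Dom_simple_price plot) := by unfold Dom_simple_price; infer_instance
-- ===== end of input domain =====

-- B replaces A's 4-direction boundary scan over every cell occurrence by a multiplicity
-- counter plus a forward-only (right/down) shared-edge count, using perimeter = 4*area - shared sides.


-- ===== PORT A =====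
def simple_price (plot : List (Int × Int)) : Int :=
  let area : Int := plot.length
  let circ : Int := plot.foldl (fun circ c =>
    [((0:Int), (-1:Int)), (1, 0), (0, 1), (-1, 0)].foldl (fun circ d =>
      if (c.1 + d.1, c.2 + d.2) ∉ plot then circ + 1 else circ) circ) 0
  circ * area

-- ===== PORT B =====
def simple_price_alt (plot : List (Int × Int)) : Int :=
  let area : Int := plot.length
  let mult : PySem.Dict (Int × Int) Int :=
    plot.foldl (fun d c => d.insert c (d.getD c 0 + 1)) PySem.Dict.empty
  let adj : Int := mult.items.foldl (fun adj p =>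
    [(p.1.1 + 1, p.1.2), (p.1.1, p.1.2 + 1)].foldl (fun adj d =>
      let md := mult.getD d 0
      if md ≠ 0 then adj + p.2 + md else adj) adj) 0
  (4 * area - adj) * area

-- ===== PRECONDITION & SPEC =====
def Spec_simple_price (plot : List (Int × Int)) (out : Int) : Prop := out = simple_price_alt plot
instance (plot : List (Int × Int)) (out : Int) : Decidable (Spec_simple_price plot out) := by unfold Spec_simple_price; infer_instance

-- ===== CLAIM (what is proved, stated in full; the proofs are below) =====
def Claim_equal_simple_price : Prop := ∀ (plot : List (Int × Int)), Dom_simple_price plot → Spec_simple_price plot (simple_price plot)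

-- ===== LEMMAS AND PROOFS =====

-- proof-side abbreviations: multiplicity, membership indicator, A's and B's per-cell contributions
def pvCnt (plot : List (Int × Int)) (q : Int × Int) : Int := (plot.count q : Int)
def pvInd (plot : List (Int × Int)) (q : Int × Int) : Int := if q ∈ plot then 1 else 0
def pvA (plot : List (Int × Int)) (c : Int × Int) : Int :=
  4 - (pvInd plot (c + (1, 0)) + pvInd plot (c - (1, 0)) +
       pvInd plot (c + (0, 1)) + pvInd plot (c - (0, 1)))
def pvB (plot : List (Int × Int)) (k : Int × Int) : Int :=
  pvInd plot (k + (1, 0)) * (pvCnt plot k + pvCnt plot (k + (1, 0))) +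
  pvInd plot (k + (0, 1)) * (pvCnt plot k + pvCnt plot (k + (0, 1)))

-- List.count under the DecidableEq-derived BEq instance equals count under the Prod BEq instance
lemma pv_count_beq (x : Int × Int) (l : List (Int × Int)) :
    @List.count _ instBEqOfDecidableEq x l = l.count x := by
  rw [@List.count_eq_countP _ instBEqOfDecidableEq, List.count_eq_countP]
  refine List.countP_congr (fun a _ => ?_)
  simp

lemma pv_len_eq (plot : List (Int × Int)) :
    (plot.length : Int) = ∑ k ∈ plot.toFinset, pvCnt plot k := by
  rw [← List.sum_toFinset_count_eq_length]
  push_cast [pvCnt]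
  exact Finset.sum_congr rfl fun x _ => by rw [pv_count_beq]

-- a backward-direction weighted adjacency sum reindexes (k ↦ k - u) to a forward-direction one
lemma pv_reindex (plot : List (Int × Int)) (u : Int × Int) :
    ∑ k ∈ plot.toFinset, pvCnt plot k * pvInd plot (k - u)
      = ∑ k ∈ plot.toFinset, pvCnt plot (k + u) * pvInd plot (k + u) := by
  have h1 : ∀ k, pvCnt plot k * pvInd plot (k - u) = if (k - u) ∈ plot then pvCnt plot k else 0 := by
    intro k; simp only [pvInd]; split_ifs <;> ring
  have h2 : ∀ k, pvCnt plot (k + u) * pvInd plot (k + u) = if (k + u) ∈ plot then pvCnt plot (k + u) else 0 := by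
    intro k; simp only [pvInd]; split_ifs <;> ring
  simp only [h1, h2, ← Finset.sum_filter]
  refine Finset.sum_nbij' (fun k => k - u) (fun k => k + u) ?_ ?_ ?_ ?_ ?_
  · intro a ha
    simp only [Finset.mem_filter, List.mem_toFinset] at *
    exact ⟨ha.2, by simpa using ha.1⟩
  · intro a ha
    simp only [Finset.mem_filter, List.mem_toFinset] at *
    exact ⟨ha.2, by simpa using ha.1⟩
  · intro a _; simp
  · intro a _; simp
  · intro a ha; simp [pvCnt]

-- A's inner 4-direction loop adds A's per-cell contribution
lemma pv_a_step (plot : List (Int × Int)) (acc : Int) (c : Int × Int) :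
    [((0:Int), (-1:Int)), (1, 0), (0, 1), (-1, 0)].foldl (fun circ d =>
      if (c.1 + d.1, c.2 + d.2) ∉ plot then circ + 1 else circ) acc
    = acc + pvA plot c := by
  cases c with
  | mk a b =>
    simp only [List.foldl, pvA, pvInd, Prod.mk_add_mk, Prod.mk_sub_mk]
    ring_nf
    split_ifs <;> ring

-- A's value as a Finset sum over the distinct cells
lemma simple_price_eq_sum (plot : List (Int × Int)) :
    simple_price plot =
      (∑ k ∈ plot.toFinset, pvCnt plot k * pvA plot k) * plot.length := by
  unfold simple_price
  have h : plot.foldl (fun circ c =>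
      [((0:Int), (-1:Int)), (1, 0), (0, 1), (-1, 0)].foldl (fun circ d =>
        if (c.1 + d.1, c.2 + d.2) ∉ plot then circ + 1 else circ) circ) 0
      = plot.foldl (fun acc c => acc + pvA plot c) 0 :=
    PySem.List.foldl_congr_mem _ _ _ _ (fun acc c _ => pv_a_step plot acc c)
  rw [h, PySem.List.foldl_add, Finset.sum_list_map_count]
  simp only [zero_add, nsmul_eq_mul]
  congr 1
  refine Finset.sum_congr rfl fun x _ => ?_
  simp only [pvCnt]
  congr 1
  exact_mod_cast pv_count_beq x plot

-- B's inner 2-direction loop adds its two guarded contributions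
lemma pv_b_step (plot : List (Int × Int)) (acc : Int) (p : (Int × Int) × Int) :
    [(p.1.1 + 1, p.1.2), (p.1.1, p.1.2 + 1)].foldl (fun adj d =>
      let md := (PySem.Dict.counter plot).getD d 0
      if md ≠ 0 then adj + p.2 + md else adj) acc
    = acc + ((if pvCnt plot (p.1 + (1, 0)) ≠ 0 then p.2 + pvCnt plot (p.1 + (1, 0)) else 0)
           + (if pvCnt plot (p.1 + (0, 1)) ≠ 0 then p.2 + pvCnt plot (p.1 + (0, 1)) else 0)) := by
  obtain ⟨⟨a, b⟩, m⟩ := p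
  simp only [List.foldl, PySem.Dict.getD_counter, pvCnt, Prod.mk_add_mk]
  ring_nf
  split_ifs <;> ring

-- 'count ≠ 0' guards are the membership indicator
lemma pv_b_item (plot : List (Int × Int)) (k : Int × Int) :
    ((if pvCnt plot (k + (1, 0)) ≠ 0 then pvCnt plot k + pvCnt plot (k + (1, 0)) else 0)
   + (if pvCnt plot (k + (0, 1)) ≠ 0 then pvCnt plot k + pvCnt plot (k + (0, 1)) else 0))
    = pvB plot k := by
  have h : ∀ q, (pvCnt plot q ≠ 0) ↔ q ∈ plot := by
    intro q
    simp [pvCnt, List.count_eq_zero]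
  unfold pvB pvInd
  by_cases h1 : (k + (1, 0)) ∈ plot <;> by_cases h2 : (k + (0, 1)) ∈ plot <;>
    simp [h, h1, h2]

lemma pv_toFinset_ofList (plot : List (Int × Int)) :
    (PySem.Set.ofList plot).toFinset = plot.toFinset := by
  ext x
  simp [List.mem_toFinset, PySem.Set.mem_ofList]

-- B's value as a Finset sum over the distinct cells
lemma simple_price_alt_eq_sum (plot : List (Int × Int)) :
    simple_price_alt plot =
      (4 * plot.length - ∑ k ∈ plot.toFinset, pvB plot k) * plot.length := by
  have e : simple_price_alt plot =
      (4 * (plot.length : Int) - (PySem.Dict.counter plot).items.foldl (fun adj p =>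
        [(p.1.1 + 1, p.1.2), (p.1.1, p.1.2 + 1)].foldl (fun adj d =>
          let md := (PySem.Dict.counter plot).getD d 0
          if md ≠ 0 then adj + p.2 + md else adj) adj) 0) * plot.length := rfl
  have h : (PySem.Dict.counter plot).items.foldl (fun adj p =>
      [(p.1.1 + 1, p.1.2), (p.1.1, p.1.2 + 1)].foldl (fun adj d =>
        let md := (PySem.Dict.counter plot).getD d 0
        if md ≠ 0 then adj + p.2 + md else adj) adj) 0
      = (PySem.Dict.counter plot).items.foldl (fun acc p =>
          acc + ((if pvCnt plot (p.1 + (1, 0)) ≠ 0 then p.2 + pvCnt plot (p.1 + (1, 0)) else 0)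
               + (if pvCnt plot (p.1 + (0, 1)) ≠ 0 then p.2 + pvCnt plot (p.1 + (0, 1)) else 0))) 0 :=
    PySem.List.foldl_congr_mem _ _ _ _ (fun acc p _ => pv_b_step plot acc p)
  rw [e, h, PySem.List.foldl_add, PySem.Dict.items_counter, List.map_map, zero_add]
  congr 2
  rw [← pv_toFinset_ofList, List.sum_toFinset _ (PySem.Set.nodup_ofList plot)]
  congr 1
  refine List.map_congr_left (fun k _ => ?_)
  show ((if pvCnt plot (k + (1, 0)) ≠ 0 then (plot.count k : Int) + pvCnt plot (k + (1, 0)) else 0)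
      + (if pvCnt plot (k + (0, 1)) ≠ 0 then (plot.count k : Int) + pvCnt plot (k + (0, 1)) else 0))
      = pvB plot k
  exact pv_b_item plot k

-- ===== VERDICT (by name: the statement is the Claim_ definition above) =====
theorem simple_price_spec : Claim_equal_simple_price := by
  intro plot _
  show simple_price plot = simple_price_alt plot
  rw [simple_price_eq_sum, simple_price_alt_eq_sum]
  congr 1
  have hr := pv_reindex plot (1, 0)
  have hd := pv_reindex plot (0, 1)
  have hn := pv_len_eq plot
  have e1 : ∑ k ∈ plot.toFinset, pvCnt plot k * pvA plot k
      = ∑ k ∈ plot.toFinset, (4 * pvCnt plot k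
          - pvCnt plot k * pvInd plot (k + (1, 0)) - pvCnt plot k * pvInd plot (k - (1, 0))
          - pvCnt plot k * pvInd plot (k + (0, 1)) - pvCnt plot k * pvInd plot (k - (0, 1))) :=
    Finset.sum_congr rfl (fun k _ => by unfold pvA; ring)
  have e2 : ∑ k ∈ plot.toFinset, pvB plot k
      = ∑ k ∈ plot.toFinset, (pvCnt plot k * pvInd plot (k + (1, 0))
          + pvCnt plot (k + (1, 0)) * pvInd plot (k + (1, 0))
          + pvCnt plot k * pvInd plot (k + (0, 1))
          + pvCnt plot (k + (0, 1)) * pvInd plot (k + (0, 1))) :=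
    Finset.sum_congr rfl (fun k _ => by unfold pvB; ring)
  rw [e1, e2]
  simp only [Finset.sum_sub_distrib, Finset.sum_add_distrib, ← Finset.mul_sum]
  rw [hr, hd, hn]
  ring
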